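-- pv_equiv track=rewrite | github.com/chiaraiurato/ISW2 | src/main/java/utilities/PlotData.py | count_columns
-- ===== SOURCE A (Python) =====
-- def count_columns(filter_list, sampler_list, sensitive_list):
--     n_cols = 0
--     for _ in filter_list:
--         for sampler in sampler_list:
--             for is_sensitive in sensitive_list:
--                 if not (is_sensitive and sampler != "NotSet"):
--                     n_cols += 1
--     return n_cols
-- ===== SOURCE B (Python) =====
-- def count_columns(filter_list, sampler_list, sensitive_list):
--     n_true = sum(1 for b in sensitive_list if b)
--     n_set = sum(1 for s in sampler_list if s != "NotSet")
--     return len(filter_list) * (len(sampler_list) * len(sensitive_list) - n_set * n_true)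
-- ===== Notes on version B (the rewrite author's own statement) =====
-- stated objective: faster
-- what changed: Replaced the triple nested loop by a closed-form product: len(filter)*(len(sampler)*len(sensitive) - (#samplers != 'NotSet')*(#truthy sensitive)).
import Mathlib
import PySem

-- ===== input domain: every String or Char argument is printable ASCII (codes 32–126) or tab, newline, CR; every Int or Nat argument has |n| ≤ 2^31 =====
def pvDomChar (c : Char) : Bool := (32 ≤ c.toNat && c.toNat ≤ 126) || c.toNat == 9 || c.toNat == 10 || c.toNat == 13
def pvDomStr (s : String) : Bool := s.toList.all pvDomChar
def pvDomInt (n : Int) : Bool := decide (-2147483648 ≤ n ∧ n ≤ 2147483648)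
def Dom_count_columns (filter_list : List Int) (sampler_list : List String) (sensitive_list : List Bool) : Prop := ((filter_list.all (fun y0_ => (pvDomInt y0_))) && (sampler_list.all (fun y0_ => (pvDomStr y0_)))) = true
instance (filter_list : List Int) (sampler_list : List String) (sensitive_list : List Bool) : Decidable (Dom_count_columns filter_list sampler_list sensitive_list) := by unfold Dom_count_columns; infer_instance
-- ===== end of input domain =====

-- B replaces A's triple nested counting loop by a closed-form product of counts (objective: faster, asymptotic).

-- ===== PORT A =====
def count_columns (filter_list : List Int) (sampler_list : List String) (sensitive_list : List Bool) : Int :=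
  filter_list.foldl (fun n_cols _ =>
    sampler_list.foldl (fun n_cols sampler =>
      sensitive_list.foldl (fun n_cols is_sensitive =>
        if ¬ (is_sensitive = true ∧ sampler ≠ "NotSet") then n_cols + 1 else n_cols)
        n_cols)
      n_cols)
    0

-- ===== PORT B =====
def count_columns_alt (filter_list : List Int) (sampler_list : List String) (sensitive_list : List Bool) : Int :=
  let n_true : Int := ((sensitive_list.filter (fun b => b)).length : Int)
  let n_set : Int := ((sampler_list.filter (fun s => s ≠ "NotSet")).length : Int)
  (filter_list.length : Int) * ((sampler_list.length : Int) * (sensitive_list.length : Int) - n_set * n_true)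

-- ===== PRECONDITION & SPEC =====
def Spec_count_columns (filter_list : List Int) (sampler_list : List String) (sensitive_list : List Bool) (out : Int) : Prop := out = count_columns_alt filter_list sampler_list sensitive_list
instance (filter_list : List Int) (sampler_list : List String) (sensitive_list : List Bool) (out : Int) : Decidable (Spec_count_columns filter_list sampler_list sensitive_list out) := by unfold Spec_count_columns; infer_instance

-- ===== CLAIM (what is proved, stated in full; the proofs are below) =====
def Claim_equal_count_columns : Prop := ∀ (filter_list : List Int) (sampler_list : List String) (sensitive_list : List Bool), Dom_count_columns filter_list sampler_list sensitive_list → Spec_count_columns filter_list sampler_list sensitive_list (count_columns filter_list sampler_list sensitive_list)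

-- ===== LEMMAS AND PROOFS =====

-- The innermost loop adds len(t) when sampler = "NotSet", else len(t) - #true.
theorem pv_inner (sampler : String) (t : List Bool) (acc : Int) :
    t.foldl (fun n_cols is_sensitive =>
        if ¬ (is_sensitive = true ∧ sampler ≠ "NotSet") then n_cols + 1 else n_cols) acc
      = acc + (t.length : Int) -
          (if sampler = "NotSet" then 0 else ((t.filter (fun b => b)).length : Int)) := by
  induction t generalizing acc with
  | nil => simp
  | cons b rest ih =>
    rw [List.foldl_cons, ih]
    by_cases hs : sampler = "NotSet" <;> cases b <;> simp [hs] <;> push_cast <;> ring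

-- The middle loop adds len(s)*len(t) - n_set*n_true.
theorem pv_middle (s : List String) (t : List Bool) (acc : Int) :
    s.foldl (fun n_cols sampler =>
        t.foldl (fun n_cols is_sensitive =>
          if ¬ (is_sensitive = true ∧ sampler ≠ "NotSet") then n_cols + 1 else n_cols) n_cols) acc
      = acc + (s.length : Int) * (t.length : Int) -
          ((s.filter (fun x => x ≠ "NotSet")).length : Int) * ((t.filter (fun b => b)).length : Int) := by
  induction s generalizing acc with
  | nil => simp
  | cons x rest ih =>
    rw [List.foldl_cons, pv_inner, ih]
    by_cases hx : x = "NotSet" <;> simp [hx] <;> push_cast <;> ring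

-- The outer loop multiplies by len(filter_list).
theorem pv_outer (f : List Int) (s : List String) (t : List Bool) (acc : Int) :
    f.foldl (fun n_cols _ =>
        s.foldl (fun n_cols sampler =>
          t.foldl (fun n_cols is_sensitive =>
            if ¬ (is_sensitive = true ∧ sampler ≠ "NotSet") then n_cols + 1 else n_cols) n_cols) n_cols) acc
      = acc + (f.length : Int) *
          ((s.length : Int) * (t.length : Int) -
            ((s.filter (fun x => x ≠ "NotSet")).length : Int) * ((t.filter (fun b => b)).length : Int)) := by
  induction f generalizing acc with
  | nil => simp
  | cons _ rest ih =>
    rw [List.foldl_cons, pv_middle, ih]; simp only [List.length_cons]; push_cast; ring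

-- ===== VERDICT (by name: the statement is the Claim_ definition above) =====
theorem count_columns_spec : Claim_equal_count_columns := by
  intro f s t _
  unfold Spec_count_columns count_columns count_columns_alt
  rw [pv_outer]; push_cast; ring
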